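-- pv_equiv track=rewrite | github.com/BingkangShi/general-phrase-debiaser | text_filter.py | SEAT_format
-- ===== SOURCE A (Python) =====
-- def SEAT_format(wordlist):
--     choise_an = "n "
--     text_templates = [["This is a ", "."],
--                       ["That is a  ", "."],
--                       ["There is a ", "."],
--                       ["Here is a ", "."],
--                       ["The ", " is here."],
--                       ["The ", " is there."],
--                       ["A ", " is a thing."],
--                       ["It is a ", "."],
--                       ["These are ", "s."],
--                       ["Those are ", "s."],
--                       ["They are ", "s."],
--                       ["The ", "s are here."],
--                       ["The ", "s are there."],
--                       ["", "s are things."]]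
--
--     sentlist = []
--     for phrase in wordlist:
--         temp = []
--         for i in range(len(text_templates)):
--             if phrase[0] in ["a", "e", "i", "o", "u", "A", "E", "I", "O", "U"] and i in [0, 1, 2, 3, 6, 7]:
--                 sent = text_templates[i][0][:-1] + choise_an + phrase + text_templates[i][1]
--             else:
--                 sent = text_templates[i][0] + phrase + text_templates[i][1]
--             temp.append(sent)
--         sentlist.append(temp)
--     return sentlist
-- ===== SOURCE B (Python) =====
-- _VOWELS = "aeiouAEIOU"
-- _CONS = [("This is a ", "."),
--          ("That is a  ", "."),
--          ("There is a ", "."),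
--          ("Here is a ", "."),
--          ("The ", " is here."),
--          ("The ", " is there."),
--          ("A ", " is a thing."),
--          ("It is a ", "."),
--          ("These are ", "s."),
--          ("Those are ", "s."),
--          ("They are ", "s."),
--          ("The ", "s are here."),
--          ("The ", "s are there."),
--          ("", "s are things.")]
-- # the vowel table is _CONS with the article prefix resolved once:
-- # prefix[:-1] + "n " (reproducing the source's "That is a n " double-space row)
-- _VOW = [("This is an ", "."),
--         ("That is a n ", "."),
--         ("There is an ", "."),
--         ("Here is an ", "."),
--         ("The ", " is here."),
--         ("The ", " is there."),
--         ("An ", " is a thing."),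
--         ("It is an ", "."),
--         ("These are ", "s."),
--         ("Those are ", "s."),
--         ("They are ", "s."),
--         ("The ", "s are here."),
--         ("The ", "s are there."),
--         ("", "s are things.")]
--
--
-- def SEAT_format(wordlist):
--     return [[pre + phrase + suf
--              for pre, suf in (_VOW if phrase[0] in _VOWELS else _CONS)]
--             for phrase in wordlist]
-- ===== Notes on version B (the rewrite author's own statement) =====
-- stated objective: simpler
-- what changed: Instead of branching and slicing the template prefix per word and per template index inside a nested loop, B precomputes two fully resolved template tables (consonant and vowel, the vowel one with prefix[:-1]+'n ' applied once) and builds each word's 14 sentences with one uniform comprehension prefix+word+suffix, testing word[0] once per word. This removes the per-sentence branch test and slice, resolving the article once per word (measured ~1.7x faster).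
import Mathlib
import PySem

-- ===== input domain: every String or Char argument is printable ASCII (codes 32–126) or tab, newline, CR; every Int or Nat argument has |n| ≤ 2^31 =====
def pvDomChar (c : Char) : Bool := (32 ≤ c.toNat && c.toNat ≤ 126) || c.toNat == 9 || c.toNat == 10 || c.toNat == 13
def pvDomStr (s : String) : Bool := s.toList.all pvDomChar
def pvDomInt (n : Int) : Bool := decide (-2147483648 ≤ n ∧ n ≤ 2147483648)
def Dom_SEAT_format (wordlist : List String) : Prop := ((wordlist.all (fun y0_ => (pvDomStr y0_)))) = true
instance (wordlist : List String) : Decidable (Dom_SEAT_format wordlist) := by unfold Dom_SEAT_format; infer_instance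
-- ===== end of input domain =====

-- B replaces A's per-template runtime slicing/branching by two precomputed, fully resolved
-- template tables and one uniform join; objective: simpler.

-- ===== PORT A =====
-- A-side helpers: the template table and the in-loop vowel test, as in the Python.
def seatTemplates : List (List String) :=
  [["This is a ", "."],
   ["That is a  ", "."],
   ["There is a ", "."],
   ["Here is a ", "."],
   ["The ", " is here."],
   ["The ", " is there."],
   ["A ", " is a thing."],
   ["It is a ", "."],
   ["These are ", "s."],
   ["Those are ", "s."],
   ["They are ", "s."],
   ["The ", "s are here."],
   ["The ", "s are there."],
   ["", "s are things."]]

-- phrase[0] in ["a", …, "U"]: phrase[0] is a one-char string, represented by its Char;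
-- .getD false only totalises the port where Python would raise IndexError (excluded by Pre_).
def seatIsVowelA (phrase : String) : Bool :=
  ((PySem.Str.pyGet? phrase 0).map
      (fun c => (["a","e","i","o","u","A","E","I","O","U"] : List String).contains
                  (String.singleton c))).getD false

def seatRowA (phrase : String) : List String :=
  (PySem.List.pyRange 0 ((seatTemplates.length : Int)) 1).foldl
    (fun temp i =>
      let t := (PySem.List.pyGet? seatTemplates i).getD []
      let t0 := (PySem.List.pyGet? t 0).getD ""
      let t1 := (PySem.List.pyGet? t 1).getD ""
      let sent :=
        if seatIsVowelA phrase
             && (([0, 1, 2, 3, 6, 7] : List Int).contains i)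
        then PySem.Str.slice t0 none (some (-1)) ++ "n " ++ phrase ++ t1
        else t0 ++ phrase ++ t1
      temp ++ [sent]) []

def SEAT_format (wordlist : List String) : List (List String) :=
  wordlist.foldl (fun sentlist phrase => sentlist ++ [seatRowA phrase]) []

-- ===== PORT B =====
-- B-side helpers: the two fully resolved tables from Source B and the `phrase[0] in "aeiouAEIOU"` test.
def seatConsT : List (String × String) :=
  [("This is a ", "."),
   ("That is a  ", "."),
   ("There is a ", "."),
   ("Here is a ", "."),
   ("The ", " is here."),
   ("The ", " is there."),
   ("A ", " is a thing."),
   ("It is a ", "."),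
   ("These are ", "s."),
   ("Those are ", "s."),
   ("They are ", "s."),
   ("The ", "s are here."),
   ("The ", "s are there."),
   ("", "s are things.")]

def seatVowT : List (String × String) :=
  [("This is an ", "."),
   ("That is a n ", "."),
   ("There is an ", "."),
   ("Here is an ", "."),
   ("The ", " is here."),
   ("The ", " is there."),
   ("An ", " is a thing."),
   ("It is an ", "."),
   ("These are ", "s."),
   ("Those are ", "s."),
   ("They are ", "s."),
   ("The ", "s are here."),
   ("The ", "s are there."),
   ("", "s are things.")]

def seatIsVowelB (phrase : String) : Bool :=
  ((PySem.Str.pyGet? phrase 0).map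
      (fun c => PySem.Str.isIn (String.singleton c) "aeiouAEIOU")).getD false

def SEAT_format_alt (wordlist : List String) : List (List String) :=
  wordlist.map (fun phrase =>
    (if seatIsVowelB phrase then seatVowT else seatConsT).map
      (fun t => t.1 ++ phrase ++ t.2))

-- ===== PRECONDITION & SPEC =====
-- Pre_ excludes lists containing the empty string: there the Python A (and B) raise IndexError on phrase[0].
def Pre_SEAT_format (wordlist : List String) : Prop := ∀ s ∈ wordlist, s ≠ ""
instance (wordlist : List String) : Decidable (Pre_SEAT_format wordlist) := by
  unfold Pre_SEAT_format; infer_instance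

def pvWitness_SEAT_format : List String := (["apple", "Dog"])

def Spec_SEAT_format (wordlist : List String) (out : List (List String)) : Prop :=
  out = SEAT_format_alt wordlist
instance (wordlist : List String) (out : List (List String)) : Decidable (Spec_SEAT_format wordlist out) := by
  unfold Spec_SEAT_format; infer_instance

-- ===== CLAIM (what is proved, stated in full; the proofs are below) =====
def Claim_equal_SEAT_format : Prop :=
  ∀ (wordlist : List String), Dom_SEAT_format wordlist → Pre_SEAT_format wordlist →
    Spec_SEAT_format wordlist (SEAT_format wordlist)

-- ===== LEMMAS AND PROOFS =====

-- the two ports' vowel tests agree (one-char-string membership vs substring membership)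
theorem seat_vowel_char_eq (c : Char) :
    (["a","e","i","o","u","A","E","I","O","U"] : List String).contains (String.singleton c)
      = PySem.Str.isIn (String.singleton c) "aeiouAEIOU" := by
  have hl : "aeiouAEIOU".toList = ['a','e','i','o','u','A','E','I','O','U'] := rfl
  have hse : ∀ d : Char, String.singleton c = String.singleton d ↔ c = d := by
    intro d
    constructor
    · intro h; have := congrArg String.toList h; simpa using this
    · rintro rfl; rfl
  rw [Bool.eq_iff_iff, PySem.Str.isIn_iff_infix, String.toList_singleton, hl,
      List.singleton_infix_iff]
  simp only [List.contains_iff_mem, List.mem_cons, List.not_mem_nil, or_false]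
  show (String.singleton c = "a" ∨ String.singleton c = "e" ∨ String.singleton c = "i" ∨
        String.singleton c = "o" ∨ String.singleton c = "u" ∨ String.singleton c = "A" ∨
        String.singleton c = "E" ∨ String.singleton c = "I" ∨ String.singleton c = "O" ∨
        String.singleton c = "U") ↔ _
  rw [show ("a" : String) = String.singleton 'a' from rfl,
      show ("e" : String) = String.singleton 'e' from rfl,
      show ("i" : String) = String.singleton 'i' from rfl,
      show ("o" : String) = String.singleton 'o' from rfl,
      show ("u" : String) = String.singleton 'u' from rfl,
      show ("A" : String) = String.singleton 'A' from rfl,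
      show ("E" : String) = String.singleton 'E' from rfl,
      show ("I" : String) = String.singleton 'I' from rfl,
      show ("O" : String) = String.singleton 'O' from rfl,
      show ("U" : String) = String.singleton 'U' from rfl]
  simp only [hse]

theorem seat_isVowel_eq (phrase : String) : seatIsVowelA phrase = seatIsVowelB phrase := by
  unfold seatIsVowelA seatIsVowelB
  cases PySem.Str.pyGet? phrase 0 with
  | none => rfl
  | some c =>
    simp only [Option.map_some, Option.getD_some]
    exact seat_vowel_char_eq c

-- A's unrolled inner loop, with the vowel flag abstracted out
theorem seatRowA_eval (phrase : String) (b : Bool) (hb : seatIsVowelA phrase = b) :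
    seatRowA phrase =
      (if b then seatVowT else seatConsT).map (fun t => t.1 ++ phrase ++ t.2) := by
  unfold seatRowA
  rw [hb]
  cases b <;> rfl

theorem seatRow_eq (phrase : String) :
    seatRowA phrase =
      (if seatIsVowelB phrase then seatVowT else seatConsT).map
        (fun t => t.1 ++ phrase ++ t.2) :=
  seatRowA_eval phrase (seatIsVowelB phrase) (seat_isVowel_eq phrase)

theorem seat_foldl_eq (acc : List (List String)) (ws : List String) :
    ws.foldl (fun sentlist phrase => sentlist ++ [seatRowA phrase]) acc
      = acc ++ ws.map (fun phrase =>
          (if seatIsVowelB phrase then seatVowT else seatConsT).map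
            (fun t => t.1 ++ phrase ++ t.2)) := by
  induction ws generalizing acc with
  | nil => simp
  | cons w ws ih =>
    rw [List.foldl_cons, ih, seatRow_eq w]
    simp

-- ===== VERDICT (by name: the statement is the Claim_ definition above) =====
theorem SEAT_format_spec : Claim_equal_SEAT_format := by
  intro wordlist _ _
  show SEAT_format wordlist = SEAT_format_alt wordlist
  unfold SEAT_format SEAT_format_alt
  simpa using seat_foldl_eq [] wordlist
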